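-- pv_equiv track=rewrite | github.com/JuliusScheuerer/document-anonymizer | src/document_anonymizer/detection/recognizers/german_tax.py | _validate_steuer_id
-- ===== SOURCE A (Python) =====
-- def _validate_steuer_id(text: str) -> bool:
--     """Validate Steuer-ID with basic structural checks.
--
--     The Steuer-ID has exactly 11 digits. One digit appears exactly twice
--     or three times; all others appear at most once. The 11th digit is a
--     check digit (we validate structural rules only).
--     """
--     clean = text.strip()
--     if len(clean) != 11 or not clean.isdigit():
--         return False
--     if clean[0] == "0":
--         return False
--
--     # Check digit distribution: in first 10 digits, exactly one digit
--     # appears 2 or 3 times, no digit appears more than 3 times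
--     first_ten = clean[:10]
--     from collections import Counter
--
--     counts = Counter(first_ten)
--
--     # Must have at most one digit appearing 2-3 times
--     multi = sum(1 for c in counts.values() if c >= 2)
--     return multi == 1 and max(counts.values()) <= 3
-- ===== SOURCE B (Python) =====
-- def _validate_steuer_id(text: str) -> bool:
--     clean = text.strip()
--     if len(clean) != 11 or not clean.isdigit() or clean[0] == "0":
--         return False
--     s = sorted(clean[:10])
--     prev = s[0]
--     run = 1
--     runs_ge2 = 0
--     max_run = 1
--     for ch in s[1:]:
--         if ch == prev:
--             run += 1
--         else:
--             if run >= 2: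
--                 runs_ge2 += 1
--             if run > max_run:
--                 max_run = run
--             run = 1
--         prev = ch
--     if run >= 2:
--         runs_ge2 += 1
--     if run > max_run:
--         max_run = run
--     return runs_ge2 == 1 and max_run <= 3
-- ===== Notes on version B (the rewrite author's own statement) =====
-- stated objective: alternative
-- what changed: Replaced the Counter histogram and its two value scans by sorting the first ten digits and doing one run-length scan over adjacent equal characters, counting runs of length >= 2 and the longest run; no frequency map is ever built.
import Mathlib
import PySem

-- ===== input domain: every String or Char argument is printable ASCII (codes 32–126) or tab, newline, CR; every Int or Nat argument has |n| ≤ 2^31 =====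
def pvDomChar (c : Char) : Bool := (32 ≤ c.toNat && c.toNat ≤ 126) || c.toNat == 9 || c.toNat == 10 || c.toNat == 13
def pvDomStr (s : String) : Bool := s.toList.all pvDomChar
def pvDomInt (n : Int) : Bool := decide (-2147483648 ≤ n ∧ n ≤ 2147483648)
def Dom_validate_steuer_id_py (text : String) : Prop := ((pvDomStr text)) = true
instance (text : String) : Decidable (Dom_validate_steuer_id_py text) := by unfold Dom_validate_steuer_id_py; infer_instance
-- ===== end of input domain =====

-- B replaces A's Counter histogram plus its two value scans by sorting the ten digits and one
-- run-length scan over adjacent equal characters; objective: alternative algorithm, same cost class.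

-- ===== PORT A =====
def validate_steuer_id_py (text : String) : Bool :=
  let clean := PySem.Chars.strip text.toList
  if clean.length != 11 || !(PySem.Chars.strIsdigit clean) then false
  else if PySem.List.pyGetD clean 0 ' ' == '0' then false  -- clean[0]: index 0 is in range (length 11 here)
  else
    let first_ten := PySem.List.slice clean none (some 10)
    let counts := PySem.Dict.counter first_ten
    let multi := (counts.values.map (fun c => if (2:Int) ≤ c then (1:Int) else 0)).sum
    -- max(counts.values()): the list is nonempty here (first_ten has 10 chars); `.getD 0` only totalizes
    decide (multi = 1) && decide ((PySem.List.max? counts.values (fun v => v)).getD 0 ≤ 3)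

-- ===== PORT B =====
-- B's `for ch in s[1:]` run-length loop: state (run, runs_ge2, max_run), prev is the previous char
def pvLoopB : List Char → Char → Nat → Nat → Nat → Nat × Nat × Nat
  | [], _, run, r2, mx => (run, r2, mx)
  | ch :: t, prev, run, r2, mx =>
      if ch == prev then pvLoopB t ch (run + 1) r2 mx
      else pvLoopB t ch 1 (if 2 ≤ run then r2 + 1 else r2) (if mx < run then run else mx)

def validate_steuer_id_py_alt (text : String) : Bool :=
  let clean := PySem.Chars.strip text.toList
  if clean.length != 11 || !(PySem.Chars.strIsdigit clean)
     || PySem.List.pyGetD clean 0 ' ' == '0' then false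
  else
    let s := PySem.List.sorted (PySem.List.slice clean none (some 10)) (fun x => x) false
    -- prev = s[0] (s has 10 chars here); loop over s[1:]
    let st := pvLoopB (PySem.List.slice s (some 1) none) (PySem.List.pyGetD s 0 ' ') 1 0 1
    let runs_ge2 := if 2 ≤ st.1 then st.2.1 + 1 else st.2.1   -- close the final run
    let max_run := if st.2.2 < st.1 then st.1 else st.2.2
    decide (runs_ge2 = 1) && decide (max_run ≤ 3)

-- ===== PRECONDITION & SPEC =====
def Spec_validate_steuer_id_py (text : String) (out : Bool) : Prop := out = validate_steuer_id_py_alt text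
instance (text : String) (out : Bool) : Decidable (Spec_validate_steuer_id_py text out) := by unfold Spec_validate_steuer_id_py; infer_instance

-- ===== CLAIM (what is proved, stated in full; the proofs are below) =====
def Claim_equal_validate_steuer_id_py : Prop := ∀ (text : String), Dom_validate_steuer_id_py text → Spec_validate_steuer_id_py text (validate_steuer_id_py text)

-- ===== LEMMAS AND PROOFS =====

-- the ten digit characters (proof-side alphabet; every char of a digit string is one of them)
def pvDigits : List Char := ['0','1','2','3','4','5','6','7','8','9']

-- proof-side normal forms both programs are reduced to:
-- number of digits occurring ≥ 2 times in l, and the largest occurrence count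
def pvD2 (l : List Char) : Nat := pvDigits.countP (fun d => 2 ≤ l.count d)
def pvMaxD (l : List Char) : Nat := (pvDigits.map (fun d => l.count d)).foldr max 0

-- B's post-loop finalisation (close the last run), as used at the end of the alt port
def pvFin (st : Nat × Nat × Nat) : Nat × Nat :=
  ((if 2 ≤ st.1 then st.2.1 + 1 else st.2.1), (if st.2.2 < st.1 then st.1 else st.2.2))

theorem char_eq_of_toNat (x c : Char) (h : x.toNat = c.toNat) : x = c :=
  Char.ext (UInt32.toNat_inj.mp h)

theorem mem_pvDigits_of_isdigit (x : Char) (h : PySem.Chars.isdigit x = true) : x ∈ pvDigits := by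
  simp only [PySem.Chars.isdigit, Bool.and_eq_true, decide_eq_true_eq] at h
  have hn1 : 48 ≤ x.toNat := h.1
  have hn2 : x.toNat ≤ 57 := h.2
  have hd : x.toNat = 48 ∨ x.toNat = 49 ∨ x.toNat = 50 ∨ x.toNat = 51 ∨ x.toNat = 52 ∨
      x.toNat = 53 ∨ x.toNat = 54 ∨ x.toNat = 55 ∨ x.toNat = 56 ∨ x.toNat = 57 := by omega
  rcases hd with h|h|h|h|h|h|h|h|h|h
  · rw [char_eq_of_toNat x '0' h]; decide
  · rw [char_eq_of_toNat x '1' h]; decide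
  · rw [char_eq_of_toNat x '2' h]; decide
  · rw [char_eq_of_toNat x '3' h]; decide
  · rw [char_eq_of_toNat x '4' h]; decide
  · rw [char_eq_of_toNat x '5' h]; decide
  · rw [char_eq_of_toNat x '6' h]; decide
  · rw [char_eq_of_toNat x '7' h]; decide
  · rw [char_eq_of_toNat x '8' h]; decide
  · rw [char_eq_of_toNat x '9' h]; decide

-- fold-max bound: the max of the mapped list is ≤ k iff every image is
theorem foldr_max_map_le (D : List Char) (f : Char → Nat) (k : Nat) :
    ((D.map f).foldr max 0 ≤ k) ↔ ∀ d ∈ D, f d ≤ k := by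
  induction D with
  | nil => simp
  | cons a D ih =>
    simp only [List.map_cons, List.foldr_cons]
    constructor
    · intro h d hd
      rcases List.mem_cons.mp hd with rfl | hd'
      · omega
      · exact (ih.mp (by omega)) d hd'
    · intro h
      have h1 := h a (by simp)
      have h2 : (D.map f).foldr max 0 ≤ k := ih.mpr (fun d hd => h d (by simp [hd]))
      omega

-- pull one occurrence of x out of a fold-max over D
theorem foldr_max_map_erase (D : List Char) (f : Char → Nat) (x : Char) (hx : x ∈ D) :
    (D.map f).foldr max 0 = max (f x) (((D.erase x).map f).foldr max 0) := by
  induction D with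
  | nil => cases hx
  | cons a D ih =>
    by_cases hax : a = x
    · subst hax; simp [List.erase_cons_head]
    · have hx' : x ∈ D := by
        rcases List.mem_cons.mp hx with h | h
        · exact absurd h.symm hax
        · exact h
      have he : (a :: D).erase x = a :: D.erase x := List.erase_cons_tail (by simp [hax])
      rw [he]; simp only [List.map_cons, List.foldr_cons, ih hx']
      omega

-- count congruence between a list and its filter away from the filtered char
theorem count_filter_ne (xs : List Char) (x d : Char) (hdx : d ≠ x) :
    (xs.filter (fun y => !(y == x))).count d = xs.count d :=
  List.count_filter (by simp [hdx])

-- peel the head digit off pvD2: its run contributes its own flag, the rest is counted in the filter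
theorem pvD2_cons (x : Char) (hx : x ∈ pvDigits) (xs : List Char) :
    pvD2 (x :: xs) = (if 2 ≤ xs.count x + 1 then 1 else 0)
      + pvD2 (xs.filter (fun y => !(y == x))) := by
  have hnd : pvDigits.Nodup := by decide
  have hperm : pvDigits.Perm (x :: pvDigits.erase x) := List.perm_cons_erase hx
  have h0 : (xs.filter (fun y => !(y == x))).count x = 0 :=
    List.count_eq_zero.mpr (by simp)
  unfold pvD2
  rw [hperm.countP_eq, hperm.countP_eq, List.countP_cons, List.countP_cons]
  have hE : List.countP (fun d => decide (2 ≤ (x :: xs).count d)) (pvDigits.erase x)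
      = List.countP (fun d => decide (2 ≤ (xs.filter (fun y => !(y == x))).count d))
          (pvDigits.erase x) := by
    apply List.countP_congr
    intro d hd
    have hdx : d ≠ x := ((List.Nodup.mem_erase_iff hnd).mp hd).1
    have hc : (x :: xs).count d = xs.count d := by simp [Ne.symm hdx]
    rw [hc, count_filter_ne xs x d hdx]
  rw [hE, List.count_cons_self, h0]
  simp
  omega

-- peel the head digit off pvMaxD
theorem pvMaxD_cons (x : Char) (hx : x ∈ pvDigits) (xs : List Char) :
    pvMaxD (x :: xs) = max (xs.count x + 1)
      (pvMaxD (xs.filter (fun y => !(y == x)))) := by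
  have hmap : (pvDigits.erase x).map (fun d => (x :: xs).count d)
      = (pvDigits.erase x).map (fun d => (xs.filter (fun y => !(y == x))).count d) := by
    apply List.map_congr_left
    intro d hd
    have hdx : d ≠ x := ((List.Nodup.mem_erase_iff (by decide : pvDigits.Nodup)).mp hd).1
    have hc : (x :: xs).count d = xs.count d := by simp [Ne.symm hdx]
    rw [hc, count_filter_ne xs x d hdx]
  have h0 : (xs.filter (fun y => !(y == x))).count x = 0 :=
    List.count_eq_zero.mpr (by simp)
  unfold pvMaxD
  rw [foldr_max_map_erase pvDigits _ x hx, foldr_max_map_erase pvDigits _ x hx,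
      hmap, List.count_cons_self, h0]
  omega

-- the run-length loop + finalisation, characterised: prev's open run of length `run` absorbs the
-- leading copies of prev in t (sortedness puts them first); the rest contributes pvD2 / pvMaxD
theorem pvLoopB_spec (t : List Char) : ∀ (prev : Char) (run r2 mx : Nat),
    (prev :: t).Pairwise (· ≤ ·) → (∀ x ∈ prev :: t, x ∈ pvDigits) →
    pvFin (pvLoopB t prev run r2 mx)
      = (r2 + (if 2 ≤ run + t.count prev then 1 else 0)
            + pvD2 (t.filter (fun y => !(y == prev))),
         max mx (max (run + t.count prev) (pvMaxD (t.filter (fun y => !(y == prev)))))) := by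
  induction t with
  | nil =>
    intro prev run r2 mx _ _
    have hD : pvD2 ([] : List Char) = 0 := by decide
    have hM : pvMaxD ([] : List Char) = 0 := by decide
    simp only [pvLoopB, pvFin, List.count_nil, List.filter_nil, hD, hM, Prod.mk.injEq]
    constructor
    · split_ifs <;> omega
    · split_ifs <;> omega
  | cons ch t ih =>
    intro prev run r2 mx hsort hdig
    by_cases hch : (ch == prev) = true
    · have hcp : ch = prev := by simpa using hch
      subst hcp
      have hsort' : (ch :: t).Pairwise (· ≤ ·) :=
        hsort.sublist (List.cons_sublist_cons.mpr (List.sublist_cons_self ch t))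
      have hdig' : ∀ x ∈ ch :: t, x ∈ pvDigits := by
        intro x hx; exact hdig x (by rcases List.mem_cons.mp hx with h | h <;> simp [h])
      have hstep : pvLoopB (ch :: t) ch run r2 mx = pvLoopB t ch (run + 1) r2 mx := by
        simp [pvLoopB]
      rw [hstep, ih ch (run + 1) r2 mx hsort' hdig']
      have hcnt : (ch :: t).count ch = t.count ch + 1 := List.count_cons_self
      have hfil : (ch :: t).filter (fun y => !(y == ch)) = t.filter (fun y => !(y == ch)) := by
        simp
      rw [hcnt, hfil, Prod.mk.injEq]
      constructor
      · split_ifs <;> omega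
      · omega
    · have hne : ch ≠ prev := by simpa using hch
      have hple : prev ≤ ch := (List.pairwise_cons.mp hsort).1 ch (by simp)
      have hchle : ∀ x ∈ t, ch ≤ x := (List.pairwise_cons.mp (List.Pairwise.of_cons hsort)).1
      have hnmem : prev ∉ ch :: t := by
        intro hmem
        rcases List.mem_cons.mp hmem with h | h
        · exact hne h.symm
        · exact hne (le_antisymm (hchle prev h) hple)
      have hcnt0 : (ch :: t).count prev = 0 := List.count_eq_zero.mpr hnmem
      have hfil : (ch :: t).filter (fun y => !(y == prev)) = ch :: t :=
        List.filter_eq_self.mpr (by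
          intro x hx
          simp only [Bool.not_eq_eq_eq_not, Bool.not_true, beq_eq_false_iff_ne, ne_eq]
          intro hxp; exact hnmem (hxp ▸ hx))
      have hstep : pvLoopB (ch :: t) prev run r2 mx
          = pvLoopB t ch 1 (if 2 ≤ run then r2 + 1 else r2) (if mx < run then run else mx) := by
        simp [pvLoopB, hch]
      have hsort' : (ch :: t).Pairwise (· ≤ ·) := List.Pairwise.of_cons hsort
      have hdig' : ∀ x ∈ ch :: t, x ∈ pvDigits := fun x hx => hdig x (by
        rcases List.mem_cons.mp hx with h | h <;> simp [h])
      rw [hstep, ih ch 1 _ _ hsort' hdig', hcnt0, hfil,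
          pvD2_cons ch (hdig ch (by simp)) t, pvMaxD_cons ch (hdig ch (by simp)) t,
          Prod.mk.injEq]
      constructor
      · split_ifs <;> omega
      · split_ifs <;> omega

-- equal countP over the distinct chars of l and over the full digit alphabet
theorem countP_ofList_eq_countP_digits (l : List Char)
    (hsub : ∀ x ∈ l, x ∈ pvDigits) :
    (PySem.Set.ofList l).countP (fun d => 2 ≤ l.count d) =
      pvDigits.countP (fun d => 2 ≤ l.count d) := by
  have hA : (((PySem.Set.ofList l) : List Char).filter (fun d => 2 ≤ l.count d)).Nodup :=
    (PySem.Set.nodup_ofList l).filter _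
  have hB : (pvDigits.filter (fun d => 2 ≤ l.count d)).Nodup := by
    apply List.Nodup.filter; decide
  have hmem : ∀ x, x ∈ ((PySem.Set.ofList l) : List Char).filter (fun d => 2 ≤ l.count d) ↔
      x ∈ pvDigits.filter (fun d => 2 ≤ l.count d) := by
    intro x
    simp only [List.mem_filter, PySem.Set.mem_ofList, decide_eq_true_eq]
    constructor
    · rintro ⟨hx, hc⟩; exact ⟨hsub x hx, hc⟩
    · rintro ⟨_, hc⟩
      refine ⟨List.count_pos_iff.mp (by omega), hc⟩
  have hperm : (((PySem.Set.ofList l) : List Char).filter (fun d => 2 ≤ l.count d)).Perm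
      (pvDigits.filter (fun d => 2 ≤ l.count d)) :=
    List.perm_of_nodup_nodup_toFinset_eq hA hB (Finset.ext (by simpa using hmem))
  simpa [List.countP_eq_length_filter] using hperm.length_eq

-- A's body after the guards equals the normal form (pvD2 = 1 and pvMaxD ≤ 3)
theorem a_body_eq (l : List Char) (hne : l ≠ [])
    (hdig : ∀ x ∈ l, PySem.Chars.isdigit x = true) :
    (decide ((((PySem.Dict.counter l).values.map (fun c => if (2:Int) ≤ c then (1:Int) else 0)).sum = 1)) &&
      decide ((PySem.List.max? (PySem.Dict.counter l).values (fun v => v)).getD 0 ≤ 3)) =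
    (decide (pvD2 l = 1) && decide (pvMaxD l ≤ 3)) := by
  have hsub : ∀ x ∈ l, x ∈ pvDigits := fun x hx => mem_pvDigits_of_isdigit x (hdig x hx)
  have hvals : (PySem.Dict.counter l).values =
      ((PySem.Set.ofList l) : List Char).map (fun k => ((l.count k : Int))) := by
    simp only [PySem.Dict.values, PySem.Dict.items_counter, List.map_map]
    rfl
  -- the 0/1-sum is the countP, which is pvD2
  have hsum : (((PySem.Dict.counter l).values.map (fun c => if (2:Int) ≤ c then (1:Int) else 0)).sum
      = ((PySem.Dict.counter l).values.countP (fun c => 2 ≤ c) : Int)) := by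
    simpa using PySem.List.sum_map_ite_one_zero (fun c : Int => decide (2 ≤ c))
      (PySem.Dict.counter l).values
  have hcount : (PySem.Dict.counter l).values.countP (fun c => 2 ≤ c) = pvD2 l := by
    unfold pvD2
    rw [hvals, List.countP_map]
    have hc1 : List.countP ((fun c : Int => decide (2 ≤ c)) ∘ fun k => ((l.count k : Int)))
        ((PySem.Set.ofList l) : List Char)
        = List.countP (fun d => decide (2 ≤ l.count d)) ((PySem.Set.ofList l) : List Char) := by
      apply List.countP_congr
      intro k _
      simp only [Function.comp_apply, decide_eq_true_eq]
      omega
    rw [hc1]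
    exact countP_ofList_eq_countP_digits l hsub
  -- the max condition: both sides say every digit occurs at most 3 times
  have hiff : (((PySem.List.max? (PySem.Dict.counter l).values (fun v => v)).getD 0 ≤ 3)
      ↔ (pvMaxD l ≤ 3)) := by
    rw [show (pvMaxD l ≤ 3) ↔ (∀ d ∈ pvDigits, l.count d ≤ 3) from foldr_max_map_le pvDigits _ 3]
    cases hmax : PySem.List.max? (PySem.Dict.counter l).values (fun v => v) with
    | none =>
      exfalso
      have hnil : (PySem.Dict.counter l).values = [] :=
        (PySem.List.max?_eq_none_iff _ _).mp hmax
      rw [hvals] at hnil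
      obtain ⟨x, hx⟩ := List.exists_mem_of_ne_nil l hne
      have hx' : x ∈ ((PySem.Set.ofList l) : List Char) := (PySem.Set.mem_ofList l x).mpr hx
      have hx'' : ((l.count x : Int)) ∈ (((PySem.Set.ofList l) : List Char).map (fun k => ((l.count k : Int)))) :=
        List.mem_map_of_mem hx'
      rw [hnil] at hx''
      simp at hx''
    | some m =>
      simp only [Option.getD_some]
      constructor
      · intro hm3 d hd
        by_cases hdl : d ∈ l
        · have hdm : ((l.count d : Int)) ∈ (PySem.Dict.counter l).values := by
            rw [hvals]
            exact List.mem_map_of_mem ((PySem.Set.mem_ofList l d).mpr hdl)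
          have := PySem.List.max?_isMax hmax _ hdm
          omega
        · have : l.count d = 0 := List.count_eq_zero.mpr hdl
          omega
      · intro hall
        have hm : m ∈ (PySem.Dict.counter l).values := PySem.List.max?_mem hmax
        rw [hvals] at hm
        obtain ⟨k, hk, rfl⟩ := List.mem_map.mp hm
        have hkl : k ∈ l := (PySem.Set.mem_ofList l k).mp hk
        have := hall k (hsub k hkl)
        omega
  have h1 : (decide ((((PySem.Dict.counter l).values.map (fun c => if (2:Int) ≤ c then (1:Int) else 0)).sum = 1))
      = decide (pvD2 l = 1)) := by
    apply decide_eq_decide.mpr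
    rw [hsum, hcount]
    omega
  have h2 : (decide ((PySem.List.max? (PySem.Dict.counter l).values (fun v => v)).getD 0 ≤ 3)
      = decide (pvMaxD l ≤ 3)) := decide_eq_decide.mpr hiff
  rw [h1, h2]

-- B's body after the guards equals the same normal form
theorem b_body_eq (l : List Char) (hne : l ≠ [])
    (hdig : ∀ x ∈ l, PySem.Chars.isdigit x = true) :
    (decide ((if 2 ≤ (pvLoopB
          (PySem.List.slice (PySem.List.sorted l (fun x => x) false) (some 1) none)
          (PySem.List.pyGetD (PySem.List.sorted l (fun x => x) false) 0 ' ') 1 0 1).1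
        then (pvLoopB
          (PySem.List.slice (PySem.List.sorted l (fun x => x) false) (some 1) none)
          (PySem.List.pyGetD (PySem.List.sorted l (fun x => x) false) 0 ' ') 1 0 1).2.1 + 1
        else (pvLoopB
          (PySem.List.slice (PySem.List.sorted l (fun x => x) false) (some 1) none)
          (PySem.List.pyGetD (PySem.List.sorted l (fun x => x) false) 0 ' ') 1 0 1).2.1) = 1) &&
      decide ((if (pvLoopB
          (PySem.List.slice (PySem.List.sorted l (fun x => x) false) (some 1) none)
          (PySem.List.pyGetD (PySem.List.sorted l (fun x => x) false) 0 ' ') 1 0 1).2.2 < (pvLoopB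
          (PySem.List.slice (PySem.List.sorted l (fun x => x) false) (some 1) none)
          (PySem.List.pyGetD (PySem.List.sorted l (fun x => x) false) 0 ' ') 1 0 1).1
        then (pvLoopB
          (PySem.List.slice (PySem.List.sorted l (fun x => x) false) (some 1) none)
          (PySem.List.pyGetD (PySem.List.sorted l (fun x => x) false) 0 ' ') 1 0 1).1
        else (pvLoopB
          (PySem.List.slice (PySem.List.sorted l (fun x => x) false) (some 1) none)
          (PySem.List.pyGetD (PySem.List.sorted l (fun x => x) false) 0 ' ') 1 0 1).2.2) ≤ 3)) =
    (decide (pvD2 l = 1) && decide (pvMaxD l ≤ 3)) := by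
  have hsub : ∀ x ∈ l, x ∈ pvDigits := fun x hx => mem_pvDigits_of_isdigit x (hdig x hx)
  have hperm : (PySem.List.sorted l (fun x => x) false).Perm l := PySem.List.sorted_perm l _ false
  have hsort : (PySem.List.sorted l (fun x => x) false).Pairwise (· ≤ ·) := by
    simpa using PySem.List.sorted_pairwise l (fun x => x)
  have hsne : PySem.List.sorted l (fun x => x) false ≠ [] := by
    simp [PySem.List.sorted_eq_nil_iff, hne]
  obtain ⟨x, xs, hsl⟩ : ∃ x xs, PySem.List.sorted l (fun x => x) false = x :: xs := by
    cases h : PySem.List.sorted l (fun x => x) false with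
    | nil => exact absurd h hsne
    | cons a b => exact ⟨a, b, rfl⟩
  rw [hsl, PySem.List.slice_from_one, PySem.List.pyGetD_zero_cons, List.tail_cons]
  have hsort' : (x :: xs).Pairwise (· ≤ ·) := hsl ▸ hsort
  have hperm' : (x :: xs).Perm l := hsl ▸ hperm
  have hdigs : ∀ y ∈ x :: xs, y ∈ pvDigits := fun y hy => hsub y (hperm'.mem_iff.mp hy)
  have hspec := pvLoopB_spec xs x 1 0 1 hsort' hdigs
  have h1 := congrArg Prod.fst hspec
  have h2 := congrArg Prod.snd hspec
  simp only [pvFin] at h1 h2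
  rw [h1, h2]
  have hcnt : ∀ d, (x :: xs).count d = l.count d := fun d => hperm'.count_eq d
  have hD2 : pvD2 (x :: xs) = pvD2 l := by
    unfold pvD2; apply List.countP_congr; intro d _; rw [hcnt]
  have hMx : pvMaxD (x :: xs) = pvMaxD l := by
    unfold pvMaxD; congr 1; apply List.map_congr_left; intro d _; rw [hcnt]
  have hD2x : pvD2 (x :: xs) = (if 2 ≤ xs.count x + 1 then 1 else 0)
      + pvD2 (xs.filter (fun y => !(y == x))) := pvD2_cons x (hdigs x (by simp)) xs
  have hMxx : pvMaxD (x :: xs) = max (xs.count x + 1)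
      (pvMaxD (xs.filter (fun y => !(y == x)))) := pvMaxD_cons x (hdigs x (by simp)) xs
  congr 1
  · apply decide_eq_decide.mpr
    rw [← hD2, hD2x]
    split_ifs <;> omega
  · apply decide_eq_decide.mpr
    rw [← hMx, hMxx]
    omega

-- ===== VERDICT (by name: the statement is the Claim_ definition above) =====

theorem validate_steuer_id_py_spec : Claim_equal_validate_steuer_id_py := by
  intro text _
  unfold Spec_validate_steuer_id_py validate_steuer_id_py validate_steuer_id_py_alt
  set clean := PySem.Chars.strip text.toList with hclean
  cases hc1 : (clean.length != 11 || !(PySem.Chars.strIsdigit clean)) with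
  | true => simp only [hc1, Bool.true_or, if_true]
  | false =>
    cases hc2 : (PySem.List.pyGetD clean 0 ' ' == '0') with
    | true => simp only [hc1, hc2, Bool.false_or, if_true, Bool.false_eq_true, if_false]
    | false =>
      simp only [hc1, hc2, Bool.false_or, Bool.false_eq_true, if_false]
      simp only [Bool.or_eq_false_iff, bne_eq_false_iff_eq] at hc1
      have hlen : clean.length = 11 := hc1.1
      have hdigall : PySem.Chars.strIsdigit clean = true := by simpa using hc1.2
      have hall : ∀ x ∈ clean, PySem.Chars.isdigit x = true := by
        have h := hdigall
        simp only [PySem.Chars.strIsdigit, Bool.and_eq_true, List.all_eq_true] at h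
        exact h.2
      have hdig10 : ∀ x ∈ PySem.List.slice clean none (some 10), PySem.Chars.isdigit x = true :=
        fun x hx => hall x (PySem.List.mem_of_mem_slice clean none (some 10) hx)
      have h10 : PySem.List.slice clean none (some 10) = clean.take 10 := by
        simp [pysem]
      have hne10 : PySem.List.slice clean none (some 10) ≠ [] := by
        rw [h10]
        intro h
        have := congrArg List.length h
        simp [hlen] at this
      rw [a_body_eq _ hne10 hdig10]
      exact (b_body_eq _ hne10 hdig10).symm
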